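-- pv_equiv track=rewrite | github.com/padelyzer/saby | analisis_profit_diario.py | _analizar_rachas_consecutivas
-- ===== SOURCE A (Python) =====
-- def _analizar_rachas_consecutivas(resultados, threshold):
--     """Analiza rachas consecutivas por encima del threshold"""
--
--     racha_actual = 0
--     racha_maxima = 0
--
--     for resultado in resultados:
--         if resultado >= threshold:
--             racha_actual += 1
--             racha_maxima = max(racha_maxima, racha_actual)
--         else:
--             racha_actual = 0
--
--     return racha_maxima
-- ===== SOURCE B (Python) =====
-- def _analizar_rachas_consecutivas(resultados, threshold):
--     """Analiza rachas consecutivas por encima del threshold (run-splitting scan)"""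
--     best = 0
--     i = 0
--     n = len(resultados)
--     while i < n:
--         if resultados[i] >= threshold:
--             j = i + 1
--             while j < n and resultados[j] >= threshold:
--                 j += 1
--             best = max(best, j - i)
--             i = j
--         else:
--             i += 1
--     return best
-- ===== Notes on version B (the rewrite author's own statement) =====
-- stated objective: alternative
-- what changed: Replaces the running counter with reset logic by a run-splitting scan: an inner pointer consumes each maximal run of values >= threshold at once and best is updated once per run.
import Mathlib
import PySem

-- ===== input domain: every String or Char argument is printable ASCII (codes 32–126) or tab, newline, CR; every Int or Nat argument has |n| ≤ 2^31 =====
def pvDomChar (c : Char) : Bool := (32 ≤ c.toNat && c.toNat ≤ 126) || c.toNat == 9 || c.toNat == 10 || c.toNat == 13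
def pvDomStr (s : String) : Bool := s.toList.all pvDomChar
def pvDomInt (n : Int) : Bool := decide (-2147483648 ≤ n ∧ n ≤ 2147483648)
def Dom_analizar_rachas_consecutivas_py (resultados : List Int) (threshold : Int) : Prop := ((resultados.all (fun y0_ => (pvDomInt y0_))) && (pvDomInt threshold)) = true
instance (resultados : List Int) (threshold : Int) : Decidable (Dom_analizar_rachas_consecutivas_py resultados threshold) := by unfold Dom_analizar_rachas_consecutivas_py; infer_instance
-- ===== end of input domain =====

-- B replaces A's running counter + reset logic by a run-splitting scan (one max per maximal run); alternative decomposition, same cost.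

-- ===== PORT A =====
-- A: single pass carrying (racha_actual, racha_maxima), resetting the counter below threshold.
def analizar_rachas_consecutivas_py (resultados : List Int) (threshold : Int) : Int :=
  (resultados.foldl
    (fun (s : Int × Int) (resultado : Int) =>
      if resultado ≥ threshold then (s.1 + 1, max s.2 (s.1 + 1)) else (0, s.2))
    (0, 0)).2

-- ===== PORT B =====
-- B: the inner while loop measures the current maximal run (takeWhile) and jumps past it (dropWhile).
def analizar_rachas_consecutivas_py_alt_go (threshold best : Int) : List Int → Int
  | [] => best
  | x :: xs =>
    if x ≥ threshold then
      let run : Int := 1 + ((xs.takeWhile (fun y => y ≥ threshold)).length : Int)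
      analizar_rachas_consecutivas_py_alt_go threshold (max best run)
        (xs.dropWhile (fun y => y ≥ threshold))
    else
      analizar_rachas_consecutivas_py_alt_go threshold best xs
termination_by l => l.length
decreasing_by
  · have := xs.length_dropWhile_le (fun y => decide (y ≥ threshold))
    simp at *; omega
  · simp

def analizar_rachas_consecutivas_py_alt (resultados : List Int) (threshold : Int) : Int :=
  analizar_rachas_consecutivas_py_alt_go threshold 0 resultados

-- ===== PRECONDITION & SPEC =====
def Spec_analizar_rachas_consecutivas_py (resultados : List Int) (threshold : Int) (out : Int) : Prop := out = analizar_rachas_consecutivas_py_alt resultados threshold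
instance (resultados : List Int) (threshold : Int) (out : Int) : Decidable (Spec_analizar_rachas_consecutivas_py resultados threshold out) := by unfold Spec_analizar_rachas_consecutivas_py; infer_instance

-- ===== CLAIM (what is proved, stated in full; the proofs are below) =====
def Claim_equal_analizar_rachas_consecutivas_py : Prop := ∀ (resultados : List Int) (threshold : Int), Dom_analizar_rachas_consecutivas_py resultados threshold → Spec_analizar_rachas_consecutivas_py resultados threshold (analizar_rachas_consecutivas_py resultados threshold)

-- ===== LEMMAS AND PROOFS =====

-- Pure (accumulator-free) value of B's run scan, used only in the proofs.
def pvR (threshold : Int) : List Int → Int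
  | [] => 0
  | x :: xs =>
    if x ≥ threshold then
      max (1 + ((xs.takeWhile (fun y => y ≥ threshold)).length : Int))
        (pvR threshold (xs.dropWhile (fun y => y ≥ threshold)))
    else
      pvR threshold xs
termination_by l => l.length
decreasing_by
  · have := xs.length_dropWhile_le (fun y => decide (y ≥ threshold))
    simp at *; omega
  · simp

theorem pvR_nil (t : Int) : pvR t [] = 0 := by rw [pvR.eq_def]

theorem pvR_cons_pos (t x : Int) (xs : List Int) (h : x ≥ t) :
    pvR t (x :: xs) = max (1 + ((xs.takeWhile (fun y => y ≥ t)).length : Int))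
      (pvR t (xs.dropWhile (fun y => y ≥ t))) := by
  rw [pvR.eq_def]; simp [h]

theorem pvR_cons_neg (t x : Int) (xs : List Int) (h : ¬ x ≥ t) :
    pvR t (x :: xs) = pvR t xs := by
  rw [pvR.eq_def]; simp [h]

theorem pvR_nonneg (t : Int) (l : List Int) : 0 ≤ pvR t l := by
  fun_induction pvR t l with
  | case1 => omega
  | case2 x xs h ih =>
    have hl : (0:Int) ≤ ((xs.takeWhile (fun y => y ≥ t)).length : Int) := by positivity
    omega
  | case3 x xs h ih => exact ih

theorem pvR_split (t : Int) (l : List Int) :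
    pvR t l = max ((l.takeWhile (fun y => y ≥ t)).length : Int)
      (pvR t (l.dropWhile (fun y => y ≥ t))) := by
  cases l with
  | nil => simp [pvR_nil]
  | cons x xs =>
    by_cases h : x ≥ t
    · rw [pvR_cons_pos t x xs h]
      simp only [List.takeWhile_cons, List.dropWhile_cons, h, decide_true, if_pos,
        List.length_cons]
      push_cast; omega
    · have h' : decide (x ≥ t) = false := by simpa using h
      rw [List.takeWhile_cons, List.dropWhile_cons]
      simp only [h', Bool.false_eq_true, if_neg, List.length_nil, Int.natCast_zero,
        not_false_iff]
      rw [pvR_cons_neg t x xs h]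
      have h0 := pvR_nonneg t xs
      omega

theorem pv_go_acc (t : Int) (l : List Int) : ∀ best : Int, 0 ≤ best →
    analizar_rachas_consecutivas_py_alt_go t best l = max best (pvR t l) := by
  fun_induction pvR t l with
  | case1 =>
    intro best hb
    rw [analizar_rachas_consecutivas_py_alt_go]
    omega
  | case2 x xs h ih =>
    intro best hb
    rw [analizar_rachas_consecutivas_py_alt_go.eq_def]
    simp only [if_pos h]
    rw [ih _ (le_trans hb (le_max_left _ _))]
    have : (0:Int) ≤ ((xs.takeWhile (fun y => y ≥ t)).length : Int) := by positivity
    omega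
  | case3 x xs h ih =>
    intro best hb
    rw [analizar_rachas_consecutivas_py_alt_go.eq_def]
    simp only [if_neg h]
    rw [ih best hb]

theorem pv_fold (t : Int) (l : List Int) : ∀ a m : Int, 0 ≤ a → a ≤ m →
    (l.foldl
      (fun (s : Int × Int) (resultado : Int) =>
        if resultado ≥ t then (s.1 + 1, max s.2 (s.1 + 1)) else (0, s.2))
      (a, m)).2
    = max m (max (a + ((l.takeWhile (fun y => y ≥ t)).length : Int)) (pvR t l)) := by
  induction l with
  | nil =>
    intro a m ha ham
    simp [pvR_nil]
    omega
  | cons x xs ih =>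
    intro a m ha ham
    by_cases h : x ≥ t
    · simp only [List.foldl_cons, if_pos h]
      rw [ih (a + 1) (max m (a + 1)) (by omega) (by omega)]
      rw [pvR_cons_pos t x xs h]
      rw [List.takeWhile_cons]
      simp only [h, decide_true, if_pos, List.length_cons]
      have hs := pvR_split t xs
      have hnn := pvR_nonneg t (xs.dropWhile (fun y => y ≥ t))
      push_cast
      omega
    · simp only [List.foldl_cons, if_neg h]
      rw [ih 0 m (by omega) (by omega)]
      rw [pvR_cons_neg t x xs h, List.takeWhile_cons]
      have h' : decide (x ≥ t) = false := by simpa using h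
      simp only [h', Bool.false_eq_true, if_neg, List.length_nil, Int.natCast_zero,
        not_false_iff]
      have hs := pvR_split t xs
      have hnn := pvR_nonneg t (xs.dropWhile (fun y => y ≥ t))
      omega

-- ===== VERDICT (by name: the statement is the Claim_ definition above) =====
theorem analizar_rachas_consecutivas_py_spec : Claim_equal_analizar_rachas_consecutivas_py := by
  intro resultados threshold _
  unfold Spec_analizar_rachas_consecutivas_py
  unfold analizar_rachas_consecutivas_py analizar_rachas_consecutivas_py_alt
  rw [pv_fold threshold resultados 0 0 le_rfl le_rfl,
    pv_go_acc threshold resultados 0 le_rfl]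
  have hs := pvR_split threshold resultados
  have hnn := pvR_nonneg threshold resultados
  have hnn2 := pvR_nonneg threshold (resultados.dropWhile (fun y => y ≥ threshold))
  omega
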